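-- pv_equiv track=rewrite | github.com/tiagooandre/FEUP-FPRO | REs/RE11/Days Until Empty.py | days_until_empty
-- ===== SOURCE A (Python) =====
-- def days_until_empty(C, l):
--     day = 0
--     tank = C
--     while (tank > 0):
--         day += 1
--         tank += l
--         if (tank > C):
--             tank = C
--         tank -= day
--     return day
-- ===== SOURCE B (Python) =====
-- def _isqrt(n):
--     if n < 2:
--         return n
--     x = n
--     y = (x + 1) // 2
--     while y < x:
--         x = y
--         y = (x + n // x) // 2
--     return x
--
--
-- def days_until_empty(C, l):
--     if C <= 0:
--         return 0
--     if l >= C: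
--         return C
--     if l > 0:
--         base, need, b = l, C - l, 1
--     else:
--         base, need, b = 0, C, 1 - 2 * l
--     s = _isqrt(b * b + 8 * need)
--     k = (s - b) // 2
--     if k < 0:
--         k = 0
--     while k * (k + b) < 2 * need:
--         k += 1
--     while k > 0 and (k - 1) * (k - 1 + b) >= 2 * need:
--         k -= 1
--     return base + k
-- ===== Notes on version B (the rewrite author's own statement) =====
-- stated objective: faster
-- what changed: Replaces the day-by-day simulation with a closed form: the capped phase is resolved explicitly (answer C if l >= C, else it lasts l days), and the draining phase's quadratic inequality is solved with an integer square root plus O(1) fix-up loops.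
import Mathlib
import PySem

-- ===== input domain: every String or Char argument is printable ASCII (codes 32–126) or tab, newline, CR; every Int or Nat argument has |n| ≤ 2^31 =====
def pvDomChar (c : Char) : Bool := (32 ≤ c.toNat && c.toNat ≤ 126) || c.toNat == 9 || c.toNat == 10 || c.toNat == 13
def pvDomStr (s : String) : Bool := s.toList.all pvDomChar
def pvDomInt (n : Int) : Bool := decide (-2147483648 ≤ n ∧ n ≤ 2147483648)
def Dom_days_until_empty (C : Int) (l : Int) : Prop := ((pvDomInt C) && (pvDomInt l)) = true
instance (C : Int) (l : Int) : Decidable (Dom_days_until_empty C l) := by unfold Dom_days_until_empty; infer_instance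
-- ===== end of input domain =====

-- B replaces A's day-by-day simulation by a closed form: an explicit capped phase, then the
-- quadratic inequality for the draining phase solved with an integer square root (objective: faster).

-- ===== PORT A =====
-- A's while-loop; the fuel argument is only a totality guard (C.toNat + 1 steps always
-- suffice, as the equivalence proof below establishes); the loop body is A's, line by line.
def pvLoopA (C l : Int) : Nat → Int → Int → Int
  | 0, day, _ => day
  | fuel+1, day, tank =>
    if tank > 0 then
      let day' := day + 1
      let tank1 := tank + l
      let tank2 := if tank1 > C then C else tank1
      pvLoopA C l fuel day' (tank2 - day')
    else day

def days_until_empty (C : Int) (l : Int) : Int := pvLoopA C l (C.toNat + 1) 0 C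

-- ===== PORT B =====
-- Newton iteration of Source B's _isqrt ('while y < x'); fuel is a totality guard (x strictly decreases).
def pvIsqrtLoop (n : Int) : Nat → Int → Int → Int
  | 0, x, _ => x
  | fuel+1, x, y =>
    if y < x then pvIsqrtLoop n fuel y (PySem.Int.floordiv (y + PySem.Int.floordiv n y) 2)
    else x

def pvIsqrt (n : Int) : Int :=
  if n < 2 then n else pvIsqrtLoop n (n.toNat + 1) n (PySem.Int.floordiv (n + 1) 2)

-- Source B's 'while k*(k+b) < 2*need: k += 1'; fuel is a totality guard (need.toNat + 1 suffices).
def pvUpLoop (b need : Int) : Nat → Int → Int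
  | 0, k => k
  | fuel+1, k => if k * (k + b) < 2 * need then pvUpLoop b need fuel (k + 1) else k

-- Source B's 'while k > 0 and (k-1)*(k-1+b) >= 2*need: k -= 1'; fuel is a totality guard.
def pvDownLoop (b need : Int) : Nat → Int → Int
  | 0, k => k
  | fuel+1, k =>
    if 0 < k ∧ 2 * need ≤ (k - 1) * (k - 1 + b) then pvDownLoop b need fuel (k - 1) else k

def days_until_empty_alt (C : Int) (l : Int) : Int :=
  if C ≤ 0 then 0
  else if l ≥ C then C
  else
    let base := if l > 0 then l else 0
    let need := if l > 0 then C - l else C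
    let b := if l > 0 then (1 : Int) else 1 - 2 * l
    let s := pvIsqrt (b * b + 8 * need)
    let k0 := PySem.Int.floordiv (s - b) 2
    let k0' := if k0 < 0 then 0 else k0
    let k1 := pvUpLoop b need (need.toNat + 1) k0'
    let k2 := pvDownLoop b need (k1.toNat + 1) k1
    base + k2

-- ===== PRECONDITION & SPEC =====
def Spec_days_until_empty (C : Int) (l : Int) (out : Int) : Prop := out = days_until_empty_alt C l
instance (C : Int) (l : Int) (out : Int) : Decidable (Spec_days_until_empty C l out) := by unfold Spec_days_until_empty; infer_instance

-- ===== CLAIM (what is proved, stated in full; the proofs are below) =====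
def Claim_equal_days_until_empty : Prop := ∀ (C : Int) (l : Int), Dom_days_until_empty C l → Spec_days_until_empty C l (days_until_empty C l)

-- ===== LEMMAS AND PROOFS =====

-- monotonicity of k ↦ k*(k+b) on k ≥ 0 for b ≥ 1
theorem pv_mono (b need x y : Int) (hb : 1 ≤ b) (hx : 0 ≤ x) (hxy : x ≤ y)
    (h : 2 * need ≤ x * (x + b)) : 2 * need ≤ y * (y + b) := by nlinarith

theorem pv_up_spec (b need : Int) : ∀ (fuel : Nat) (k : Int), 0 ≤ k →
    (∃ m : Nat, m < fuel ∧ 2 * need ≤ (k + m) * ((k + m) + b)) →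
    0 ≤ pvUpLoop b need fuel k ∧
      2 * need ≤ pvUpLoop b need fuel k * (pvUpLoop b need fuel k + b) := by
  intro fuel
  induction fuel with
  | zero => intro k _ ⟨m, hm, _⟩; omega
  | succ f ih =>
    intro k hk ⟨m, hm, hP⟩
    rw [pvUpLoop]
    split_ifs with hc
    · have hm0 : m ≠ 0 := by
        rintro rfl; simp at hP; omega
      obtain ⟨m', rfl⟩ : ∃ m', m = m' + 1 := ⟨m - 1, by omega⟩
      refine ih (k + 1) (by omega) ⟨m', by omega, ?_⟩
      have : (k + 1) + (m' : Int) = k + ((m' : Int) + 1) := by ring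
      rw [this]; push_cast at hP ⊢; linarith [hP]
    · exact ⟨hk, by omega⟩

theorem pv_down_spec (b need : Int) : ∀ (fuel : Nat) (k : Int), 0 ≤ k → k.toNat < fuel →
    2 * need ≤ k * (k + b) →
    0 ≤ pvDownLoop b need fuel k ∧
      2 * need ≤ pvDownLoop b need fuel k * (pvDownLoop b need fuel k + b) ∧
      (pvDownLoop b need fuel k = 0 ∨
        ¬ 2 * need ≤ (pvDownLoop b need fuel k - 1) * ((pvDownLoop b need fuel k - 1) + b)) := by
  intro fuel
  induction fuel with
  | zero => intro k _ h _; omega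
  | succ f ih =>
    intro k hk hfuel hP
    rw [pvDownLoop]
    split_ifs with hc
    · exact ih (k - 1) (by omega) (by omega) hc.2
    · rw [not_and] at hc
      refine ⟨hk, hP, ?_⟩
      by_cases h0 : k = 0
      · exact Or.inl h0
      · exact Or.inr (by intro h; exact hc (by omega) h)

-- the uncapped (draining) phase of A's loop: exactly k more iterations from state (day, tank)
theorem pv_drain (C l : Int) : ∀ (k : Nat), ∀ (fuel : Nat) (day tank : Int), k < fuel →
    tank + l ≤ C → l ≤ day + 1 →
    (∀ j : Nat, j < k → 0 < 2 * tank + 2 * (j : Int) * (l - day) - (j : Int) * ((j : Int) + 1)) →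
    2 * tank + 2 * (k : Int) * (l - day) - (k : Int) * ((k : Int) + 1) ≤ 0 →
    pvLoopA C l fuel day tank = day + k := by
  intro k
  induction k with
  | zero =>
    intro fuel day tank hfuel _ _ _ hfin
    obtain ⟨f, rfl⟩ : ∃ f, fuel = f + 1 := ⟨fuel - 1, by omega⟩
    rw [pvLoopA]
    have : ¬ tank > 0 := by push_cast at hfin; omega
    simp [this]
  | succ k ih =>
    intro fuel day tank hfuel hcap hday hpre hfin
    obtain ⟨f, rfl⟩ : ∃ f, fuel = f + 1 := ⟨fuel - 1, by omega⟩
    rw [pvLoopA]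
    have ht : tank > 0 := by have := hpre 0 (by omega); push_cast at this; omega
    have hnc : ¬ tank + l > C := by omega
    simp only [ht, if_true, hnc, if_false]
    have heq : pvLoopA C l f (day + 1) (tank + l - (day + 1)) = (day + 1) + (k : Int) := by
      refine ih f (day + 1) (tank + l - (day + 1)) (by omega) (by omega) (by omega) ?_ ?_
      · intro j hj
        have h' := hpre (j + 1) (by omega)
        push_cast at h' ⊢
        nlinarith [h']
      · push_cast at hfin ⊢
        nlinarith [hfin]
    rw [heq]; push_cast; ring

-- the capped phase: m iterations from the start, tank pinned to C - day
theorem pv_chain (C l : Int) : ∀ (m : Nat) (fuel : Nat),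
    (∀ j : Nat, j < m → (j : Int) < l ∧ (j : Int) < C) →
    pvLoopA C l (fuel + m) 0 C = pvLoopA C l fuel (m : Int) (C - (m : Int)) := by
  intro m
  induction m with
  | zero => intro fuel _; simp
  | succ m ih =>
    intro fuel h
    have h1 : fuel + (m + 1) = (fuel + 1) + m := by omega
    rw [h1, ih (fuel + 1) (fun j hj => h j (by omega))]
    rw [pvLoopA]
    have hm := h m (by omega)
    have ht : C - (m : Int) > 0 := by omega
    have hc : C - (m : Int) + l > C := by omega
    simp only [ht, if_true, hc, if_true]
    push_cast; ring_nf

-- the core of B: after the two fix-up loops, k2 is the least k ≥ 0 with k*(k+b) ≥ 2*need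
theorem pv_bcore (b need k0 : Int) (hb : 1 ≤ b) (hneed : 1 ≤ need) (hk0 : 0 ≤ k0) :
    0 ≤ pvDownLoop b need ((pvUpLoop b need (need.toNat + 1) k0).toNat + 1)
          (pvUpLoop b need (need.toNat + 1) k0) ∧
    2 * need ≤ (pvDownLoop b need ((pvUpLoop b need (need.toNat + 1) k0).toNat + 1)
          (pvUpLoop b need (need.toNat + 1) k0)) *
        ((pvDownLoop b need ((pvUpLoop b need (need.toNat + 1) k0).toNat + 1)
          (pvUpLoop b need (need.toNat + 1) k0)) + b) ∧
    (∀ j : Int, 0 ≤ j →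
        j < pvDownLoop b need ((pvUpLoop b need (need.toNat + 1) k0).toNat + 1)
          (pvUpLoop b need (need.toNat + 1) k0) → ¬ 2 * need ≤ j * (j + b)) ∧
    pvDownLoop b need ((pvUpLoop b need (need.toNat + 1) k0).toNat + 1)
          (pvUpLoop b need (need.toNat + 1) k0) ≤ need := by
  have hPneed : 2 * need ≤ need * (need + b) := by nlinarith
  have hup : 0 ≤ pvUpLoop b need (need.toNat + 1) k0 ∧
      2 * need ≤ pvUpLoop b need (need.toNat + 1) k0 * (pvUpLoop b need (need.toNat + 1) k0 + b) := by
    refine pv_up_spec b need _ k0 hk0 ?_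
    by_cases h : k0 < need
    · refine ⟨(need - k0).toNat, by omega, ?_⟩
      have : k0 + ((need - k0).toNat : Int) = need := by omega
      rw [this]; exact hPneed
    · exact ⟨0, by omega, by
        push_cast
        exact pv_mono b need need (k0 + 0) hb (by omega) (by omega) hPneed⟩
  set k1 := pvUpLoop b need (need.toNat + 1) k0 with hk1
  have hdown := pv_down_spec b need (k1.toNat + 1) k1 hup.1 (by omega) hup.2
  set k2 := pvDownLoop b need (k1.toNat + 1) k1 with hk2
  obtain ⟨hk2nn, hk2P, hk2min⟩ := hdown
  have hmin : ∀ j : Int, 0 ≤ j → j < k2 → ¬ 2 * need ≤ j * (j + b) := by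
    intro j hj hjk hPj
    rcases hk2min with h0 | hfail
    · omega
    · exact hfail (pv_mono b need j (k2 - 1) hb hj (by omega) hPj)
  have hle : k2 ≤ need := by
    by_contra h
    exact hmin need (by omega) (by omega) hPneed
  exact ⟨hk2nn, hk2P, hmin, hle⟩

-- ===== VERDICT (by name: the statement is the Claim_ definition above) =====
theorem days_until_empty_spec : Claim_equal_days_until_empty := by
  intro C l _
  unfold Spec_days_until_empty days_until_empty days_until_empty_alt
  by_cases hC : C ≤ 0
  · have h0 : C.toNat = 0 := Int.toNat_of_nonpos hC
    rw [h0]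
    rw [pvLoopA]
    simp [hC]
  · rw [not_le] at hC
    by_cases hl : l ≥ C
    · -- fully capped: A runs exactly C iterations, tank = C - day throughout
      have h1 : C.toNat + 1 = 1 + C.toNat := by omega
      rw [h1, pv_chain C l C.toNat 1 (fun j hj => by constructor <;> omega)]
      have hcc : ((C.toNat : Int)) = C := by omega
      rw [hcc]
      rw [pvLoopA]
      simp [hC, hl]
    · rw [ge_iff_le, not_le] at hl
      rw [if_neg (by omega : ¬ C ≤ 0), if_neg (by omega : ¬ l ≥ C)]
      by_cases hlp : l > 0
      · -- capped phase of length l, then drain with b = 1, need = C - l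
        simp only [hlp, if_true]
        set k0' := (if PySem.Int.floordiv (pvIsqrt (1 * 1 + 8 * (C - l)) - 1) 2 < 0 then 0
          else PySem.Int.floordiv (pvIsqrt (1 * 1 + 8 * (C - l)) - 1) 2) with hk0'
        have hk0nn : 0 ≤ k0' := by rw [hk0']; split_ifs with h; omega; omega
        obtain ⟨hnn, hP, hmin, hle⟩ := pv_bcore 1 (C - l) k0' le_rfl (by omega) hk0nn
        set k2 := pvDownLoop 1 (C - l) ((pvUpLoop 1 (C - l) ((C - l).toNat + 1) k0').toNat + 1)
          (pvUpLoop 1 (C - l) ((C - l).toNat + 1) k0') with hk2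
        have h1 : C.toNat + 1 = ((C - l).toNat + 1) + l.toNat := by omega
        rw [h1, pv_chain C l l.toNat ((C - l).toNat + 1) (fun j hj => by constructor <;> omega)]
        have hcc : ((l.toNat : Int)) = l := by omega
        rw [hcc]
        have hres := pv_drain C l k2.toNat ((C - l).toNat + 1) l (C - l) (by omega)
          (by omega) (by omega) ?_ ?_
        · rw [hres]; omega
        · intro j hj
          have := hmin (j : Int) (by omega) (by omega)
          push_cast at this ⊢
          nlinarith [this]
        · have : ((k2.toNat : Int)) = k2 := by omega
          rw [this]
          nlinarith [hP]
      · -- no capping at all: drain from (0, C) with b = 1 - 2l, need = C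
        simp only [hlp, if_false]
        set k0' := (if PySem.Int.floordiv (pvIsqrt ((1 - 2 * l) * (1 - 2 * l) + 8 * C) - (1 - 2 * l)) 2 < 0 then 0
          else PySem.Int.floordiv (pvIsqrt ((1 - 2 * l) * (1 - 2 * l) + 8 * C) - (1 - 2 * l)) 2) with hk0'
        have hk0nn : 0 ≤ k0' := by rw [hk0']; split_ifs with h; omega; omega
        obtain ⟨hnn, hP, hmin, hle⟩ := pv_bcore (1 - 2 * l) C k0' (by omega) (by omega) hk0nn
        set k2 := pvDownLoop (1 - 2 * l) C ((pvUpLoop (1 - 2 * l) C (C.toNat + 1) k0').toNat + 1)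
          (pvUpLoop (1 - 2 * l) C (C.toNat + 1) k0') with hk2
        have hres := pv_drain C l k2.toNat (C.toNat + 1) 0 C (by omega)
          (by omega) (by omega) ?_ ?_
        · rw [hres]; omega
        · intro j hj
          have := hmin (j : Int) (by omega) (by omega)
          push_cast at this ⊢
          nlinarith [this]
        · have : ((k2.toNat : Int)) = k2 := by omega
          rw [this]
          nlinarith [hP]
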